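-- pv_equiv track=rewrite | github.com/rdatools/rdametrics | data/load_aggregates.py | merge_aggregates
-- ===== SOURCE A (Python) =====
-- from typing import Dict, List, Set, Any
--
-- def merge_aggregates(
--     separate_aggs: List[Dict[str, Dict[str, Any]]],
-- ) -> Dict[str, Dict[str, Any]]:
--     """Merge the separate aggregates together."""
--
--     all_names = set().union(*separate_aggs)
--     merged = {name: {} for name in sorted(all_names)}
--
--     for d in separate_aggs:
--         for name, info in d.items():
--             merged[name].update(info)
--
--     return merged
-- ===== SOURCE B (Python) =====
-- def merge_aggregates(separate_aggs):
--     """Merge the separate aggregates together."""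
--     all_names = set().union(*separate_aggs)
--     return {
--         name: {k: v for d in separate_aggs for k, v in d.get(name, {}).items()}
--         for name in sorted(all_names)
--     }
-- ===== Notes on version B (the rewrite author's own statement) =====
-- stated objective: simpler
-- what changed: Transposed traversal: instead of pre-seeding a shared mutable merged map and updating it dict-by-dict, B builds each name's merged sub-dict independently with a nested comprehension iterating name-first (over sorted names) and dict-second (over d.get(name, {}).items() in list order).
import Mathlib
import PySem

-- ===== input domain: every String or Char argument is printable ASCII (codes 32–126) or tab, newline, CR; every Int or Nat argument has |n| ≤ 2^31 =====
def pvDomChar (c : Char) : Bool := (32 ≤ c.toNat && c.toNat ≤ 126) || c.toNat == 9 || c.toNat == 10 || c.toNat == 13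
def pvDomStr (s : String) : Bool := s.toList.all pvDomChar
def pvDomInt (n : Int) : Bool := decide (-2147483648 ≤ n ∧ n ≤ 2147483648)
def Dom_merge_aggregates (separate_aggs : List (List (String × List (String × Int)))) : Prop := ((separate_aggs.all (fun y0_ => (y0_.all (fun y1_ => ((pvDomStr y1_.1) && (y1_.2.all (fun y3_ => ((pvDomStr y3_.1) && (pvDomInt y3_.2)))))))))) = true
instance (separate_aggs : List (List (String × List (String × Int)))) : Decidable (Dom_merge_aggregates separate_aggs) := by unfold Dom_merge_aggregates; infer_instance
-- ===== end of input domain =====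

-- B replaces A's shared mutable merged map (dict-first traversal) by a transposed,
-- name-first nested comprehension building each merged sub-dict independently (objective: simpler).

-- ===== PORT A =====
-- 'merged[name].update(info)': name always occurs in merged (it came from all_names),
-- so Python's KeyError is unreachable and Dict.modify is exact here.
def merge_aggregates (separate_aggs : List (List (String × List (String × Int)))) : List (String × List (String × Int)) :=
  let all_names : PySem.Set String :=
    separate_aggs.foldl (fun s d => PySem.Set.update s (d.map Prod.fst)) PySem.Set.empty
  let merged : PySem.Dict String (PySem.Dict String Int) :=
    (PySem.List.sorted all_names (fun x => x) false).foldl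
      (fun m name => m.insert name PySem.Dict.empty) PySem.Dict.empty
  let merged :=
    separate_aggs.foldl (fun m d =>
      d.foldl (fun m p => m.modify p.1 PySem.Dict.empty (fun cur => cur.update p.2)) m) merged
  merged.items.map (fun q => (q.1, q.2.items))

-- ===== PORT B =====
def merge_aggregates_alt (separate_aggs : List (List (String × List (String × Int)))) : List (String × List (String × Int)) :=
  let all_names : PySem.Set String :=
    separate_aggs.foldl (fun s d => PySem.Set.update s (d.map Prod.fst)) PySem.Set.empty
  (PySem.List.sorted all_names (fun x => x) false).map (fun name =>
    (name,
      (separate_aggs.foldl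
        (fun acc d => acc.update (((PySem.Dict.mk d).get? name).getD []))
        (PySem.Dict.empty : PySem.Dict String Int)).items))

-- ===== PRECONDITION & SPEC =====
-- Pre_ only states the dict-representation invariant: each inner association list models a
-- Python dict, so its keys are pairwise distinct; every actual Python input satisfies this.
def Pre_merge_aggregates (separate_aggs : List (List (String × List (String × Int)))) : Prop :=
  ∀ d ∈ separate_aggs, (d.map Prod.fst).Nodup
instance (separate_aggs : List (List (String × List (String × Int)))) : Decidable (Pre_merge_aggregates separate_aggs) := by unfold Pre_merge_aggregates; infer_instance
def pvWitness_merge_aggregates : (List (List (String × List (String × Int)))) :=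
  [[("a", [("x", 1)])], [("a", [("x", 2), ("y", 3)]), ("b", [])]]
def Spec_merge_aggregates (separate_aggs : List (List (String × List (String × Int)))) (out : List (String × List (String × Int))) : Prop := out = merge_aggregates_alt separate_aggs
instance (separate_aggs : List (List (String × List (String × Int)))) (out : List (String × List (String × Int))) : Decidable (Spec_merge_aggregates separate_aggs out) := by unfold Spec_merge_aggregates; infer_instance

-- ===== CLAIM (what is proved, stated in full; the proofs are below) =====
def Claim_equal_merge_aggregates : Prop := ∀ (separate_aggs : List (List (String × List (String × Int)))), Dom_merge_aggregates separate_aggs → Pre_merge_aggregates separate_aggs → Spec_merge_aggregates separate_aggs (merge_aggregates separate_aggs)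

-- ===== LEMMAS AND PROOFS =====

-- the union-of-key-sets fold keeps the Set invariant (distinct elements)
theorem pv_nodup_names (L : List (List (String × List (String × Int)))) :
    ∀ (s : PySem.Set String), s.Nodup →
      (L.foldl (fun s d => PySem.Set.update s (d.map Prod.fst)) s).Nodup := by
  induction L with
  | nil => intro s hs; exact hs
  | cons d L ih => intro s hs; exact ih _ (PySem.Set.nodup_update s _ hs)

-- membership in the union fold is preserved as more dicts are folded in
theorem pv_mem_foldl_update (L : List (List (String × List (String × Int)))) (x : String) :
    ∀ (s : PySem.Set String), x ∈ s →
      x ∈ L.foldl (fun s d => PySem.Set.update s (d.map Prod.fst)) s := by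
  induction L with
  | nil => intro s hs; exact hs
  | cons d L ih =>
    intro s hs
    exact ih _ ((PySem.Set.mem_update s _ x).mpr (Or.inl hs))

-- every key occurring in some dict of L ends up in the union fold
theorem pv_mem_names (L : List (List (String × List (String × Int))))
    {d : List (String × List (String × Int))} (hd : d ∈ L)
    {p : String × List (String × Int)} (hp : p ∈ d) :
    ∀ (s : PySem.Set String),
      p.1 ∈ L.foldl (fun s d => PySem.Set.update s (d.map Prod.fst)) s := by
  induction L with
  | nil => cases hd
  | cons e L ih =>
    intro s
    rcases List.mem_cons.mp hd with rfl | hd'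
    · exact pv_mem_foldl_update L p.1 _
        ((PySem.Set.mem_update s _ p.1).mpr (Or.inr (List.mem_map_of_mem hp)))
    · exact ih hd' _

-- one dict of A's update loop acts pointwise on a Nodup-keyed merged map
theorem pv_step_items (d : List (String × List (String × Int))) :
    ∀ (m : PySem.Dict String (PySem.Dict String Int)), m.keys.Nodup →
      (d.map Prod.fst).Nodup →
      (∀ p ∈ d, m.contains p.1 = true) →
      (d.foldl (fun m p => m.modify p.1 PySem.Dict.empty (fun cur => cur.update p.2)) m).items
        = m.items.map (fun q => (q.1, q.2.update (((PySem.Dict.mk d).get? q.1).getD []))) := by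
  induction d with
  | nil =>
    intro m _ _ _
    simp [PySem.Dict.get?, PySem.Dict.update]
  | cons p rest ih =>
    intro m hm hd hin
    have hcont : m.contains p.1 = true := hin p (List.mem_cons_self ..)
    have hrestnd : (rest.map Prod.fst).Nodup := (List.nodup_cons.mp hd).2
    have hpnot : p.1 ∉ rest.map Prod.fst := (List.nodup_cons.mp hd).1
    -- the modified map
    have hmod : m.modify p.1 PySem.Dict.empty (fun cur => cur.update p.2)
        = m.insert p.1 ((m.getD p.1 PySem.Dict.empty).update p.2) := rfl
    set m' := m.insert p.1 ((m.getD p.1 PySem.Dict.empty).update p.2) with hm'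
    have hm'keys : m'.keys.Nodup := PySem.Dict.nodup_keys_insert m _ _ hm
    have hm'cont : ∀ q ∈ rest, m'.contains q.1 = true := by
      intro q hq
      have := hin q (List.mem_cons_of_mem _ hq)
      rw [hm', PySem.Dict.contains_insert]
      simp [this]
    have hitems : m'.items
        = m.items.map (fun q => if (q.1 == p.1) = true then (p.1, (m.getD p.1 PySem.Dict.empty).update p.2) else q) :=
      PySem.Dict.items_insert_of_contains m _ hcont
    calc ((p :: rest).foldl (fun m p => m.modify p.1 PySem.Dict.empty (fun cur => cur.update p.2)) m).items
        = (rest.foldl (fun m p => m.modify p.1 PySem.Dict.empty (fun cur => cur.update p.2)) m').items := by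
          rw [List.foldl_cons, hmod]
      _ = m'.items.map (fun q => (q.1, q.2.update (((PySem.Dict.mk rest).get? q.1).getD []))) :=
          ih m' hm'keys hrestnd hm'cont
      _ = m.items.map (fun q => (q.1, q.2.update (((PySem.Dict.mk (p :: rest)).get? q.1).getD []))) := by
          rw [hitems, List.map_map]
          refine List.map_congr_left ?_
          intro q hq
          by_cases hqp : q.1 = p.1
          · have hgetd : m.getD p.1 PySem.Dict.empty = q.2 := by
              have : (q.1, q.2) ∈ m.items := by simpa using hq
              rw [← hqp]; exact PySem.Dict.getD_of_mem_items m this hm _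
            have hrestnone : (PySem.Dict.mk rest).get? p.1 = none := by
              rw [PySem.Dict.get?_eq_none_iff_not_mem_keys]
              simpa [PySem.Dict.keys] using hpnot
            simp only [Function.comp, hqp, beq_self_eq_true, if_pos]
            rw [PySem.Dict.get?_mk_cons]
            simp [hrestnone, hgetd, PySem.Dict.update]
          · have hbeq : (q.1 == p.1) = false := by simpa using hqp
            have hbeq' : (p.1 == q.1) = false := by simpa using (Ne.symm hqp)
            simp only [Function.comp, hbeq, if_neg, Bool.false_eq_true, not_false_iff]
            rw [PySem.Dict.get?_mk_cons]
            simp [hbeq']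

-- A's whole update loop acts pointwise, accumulating B's per-name fold
theorem pv_main_items (L : List (List (String × List (String × Int)))) :
    ∀ (m : PySem.Dict String (PySem.Dict String Int)), m.keys.Nodup →
      (∀ d ∈ L, (d.map Prod.fst).Nodup) →
      (∀ d ∈ L, ∀ p ∈ d, m.contains p.1 = true) →
      (L.foldl (fun m d =>
          d.foldl (fun m p => m.modify p.1 PySem.Dict.empty (fun cur => cur.update p.2)) m) m).items
        = m.items.map (fun q =>
            (q.1, L.foldl (fun acc d => acc.update (((PySem.Dict.mk d).get? q.1).getD [])) q.2)) := by
  induction L with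
  | nil => intro m _ _ _; simp
  | cons d L ih =>
    intro m hm hnd hin
    have hstep := pv_step_items d m hm (hnd d (List.mem_cons_self ..))
      (hin d (List.mem_cons_self ..))
    set m1 := d.foldl (fun m p => m.modify p.1 PySem.Dict.empty (fun cur => cur.update p.2)) m with hm1
    have hkeys : m1.keys = m.keys := by
      show m1.items.map Prod.fst = m.items.map Prod.fst
      rw [hstep, List.map_map]
      rfl
    have hm1nd : m1.keys.Nodup := by rw [hkeys]; exact hm
    have hm1in : ∀ e ∈ L, ∀ p ∈ e, m1.contains p.1 = true := by
      intro e he p hp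
      have h1 := (PySem.Dict.contains_iff_mem_keys m p.1).mp (hin e (List.mem_cons_of_mem _ he) p hp)
      exact (PySem.Dict.contains_iff_mem_keys m1 p.1).mpr (hkeys ▸ h1)
    rw [List.foldl_cons, ← hm1, ih m1 hm1nd (fun e he => hnd e (List.mem_cons_of_mem _ he)) hm1in,
      hstep, List.map_map]
    rfl

-- the equivalence, stated on the zeta-reduced bodies of the two ports
theorem pv_final (l : List (List (String × List (String × Int))))
    (hpre : ∀ d ∈ l, (d.map Prod.fst).Nodup) :
    List.map (fun q => (q.1, q.2.items))
      (List.foldl (fun m d =>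
          d.foldl (fun m p => m.modify p.1 PySem.Dict.empty (fun cur => cur.update p.2)) m)
        (List.foldl (fun m name => m.insert name PySem.Dict.empty)
          (PySem.Dict.empty : PySem.Dict String (PySem.Dict String Int))
          (PySem.List.sorted (l.foldl (fun s d => PySem.Set.update s (d.map Prod.fst)) PySem.Set.empty) (fun x => x) false))
        l).items
    = List.map (fun name =>
        (name, (List.foldl (fun acc d => PySem.Dict.update acc (((PySem.Dict.mk d).get? name).getD []))
                  (PySem.Dict.empty : PySem.Dict String Int) l).items))
        (PySem.List.sorted (l.foldl (fun s d => PySem.Set.update s (d.map Prod.fst)) PySem.Set.empty) (fun x => x) false) := by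
  set names := l.foldl (fun s d => PySem.Set.update s (d.map Prod.fst)) PySem.Set.empty with hnames
  set sn := PySem.List.sorted names (fun x => x) false with hsn
  have hnamesnd : names.Nodup := pv_nodup_names l PySem.Set.empty List.nodup_nil
  have hsnnd : sn.Nodup := (PySem.List.sorted_perm names (fun x => x) false).symm.nodup hnamesnd
  set merged0 : PySem.Dict String (PySem.Dict String Int) :=
    sn.foldl (fun m name => m.insert name PySem.Dict.empty) PySem.Dict.empty with hmerged0
  have hitems0 : merged0.items = sn.map (fun n => (n, (PySem.Dict.empty : PySem.Dict String Int))) := by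
    have := PySem.Dict.items_foldl_insert_fresh sn (fun n => n)
      (fun _ => (PySem.Dict.empty : PySem.Dict String Int)) PySem.Dict.empty
      (fun a _ => PySem.Dict.contains_empty a) (by simpa using hsnnd)
    simpa using this
  have hkeys0 : merged0.keys = sn := by
    show merged0.items.map Prod.fst = sn
    rw [hitems0, List.map_map]
    exact List.map_id sn
  have hnd0 : merged0.keys.Nodup := by rw [hkeys0]; exact hsnnd
  have hin0 : ∀ d ∈ l, ∀ p ∈ d, merged0.contains p.1 = true := by
    intro d hd p hp
    refine (PySem.Dict.contains_iff_mem_keys merged0 p.1).mpr ?_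
    rw [hkeys0]
    exact ((PySem.List.sorted_perm names (fun x => x) false).mem_iff).mpr (pv_mem_names l hd hp _)
  rw [pv_main_items l merged0 hnd0 hpre hin0, hitems0, List.map_map, List.map_map]
  rfl

-- ===== VERDICT (by name: the statement is the Claim_ definition above) =====
theorem merge_aggregates_spec : Claim_equal_merge_aggregates := by
  intro l _ hpre
  unfold Spec_merge_aggregates
  exact pv_final l hpre
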